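-- pv_equiv track=rewrite | github.com/thehalleyyoung/deppy | tests/test_equivalence/test_hard_eq_pairs.py | eq13b
-- ===== SOURCE A (Python) =====
-- from collections import defaultdict, Counter, deque, OrderedDict
--
-- def eq13b(edges, source, sink, threshold):
--     """BFS with explicit state tracking."""
--     adj = defaultdict(list)
--     for u, v, w in edges:
--         adj[u].append((v, w))
--     count = 0
--     # State: (node, weight, visited_frozenset)
--     queue = deque([(source, 0, frozenset([source]))])
--     while queue:
--         u, w, visited = queue.popleft()
--         if w >= threshold:
--             continue
--         if u == sink:
--             count += 1
--             continue
--         for v, wt in adj[u]: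
--             if v not in visited:
--                 queue.append((v, w + wt, visited | {v}))
--     return count
-- ===== SOURCE B (Python) =====
-- def eq13b(edges, source, sink, threshold):
--     """Recursive DFS with backtracking instead of a BFS queue of explicit states."""
--     def dfs(u, w, visited):
--         if w >= threshold:
--             return 0
--         if u == sink:
--             return 1
--         return sum(dfs(v, w + wt, visited | {v})
--                    for a, v, wt in edges
--                    if a == u and v not in visited)
--     return dfs(source, 0, frozenset([source]))
-- ===== Notes on version B (the rewrite author's own statement) =====
-- stated objective: simpler
-- what changed: Replaces the defaultdict adjacency map plus explicit deque-BFS over (node, weight, visited) states with a short recursive DFS that scans the edge list directly and sums the counts of the recursive calls.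
import Mathlib
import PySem

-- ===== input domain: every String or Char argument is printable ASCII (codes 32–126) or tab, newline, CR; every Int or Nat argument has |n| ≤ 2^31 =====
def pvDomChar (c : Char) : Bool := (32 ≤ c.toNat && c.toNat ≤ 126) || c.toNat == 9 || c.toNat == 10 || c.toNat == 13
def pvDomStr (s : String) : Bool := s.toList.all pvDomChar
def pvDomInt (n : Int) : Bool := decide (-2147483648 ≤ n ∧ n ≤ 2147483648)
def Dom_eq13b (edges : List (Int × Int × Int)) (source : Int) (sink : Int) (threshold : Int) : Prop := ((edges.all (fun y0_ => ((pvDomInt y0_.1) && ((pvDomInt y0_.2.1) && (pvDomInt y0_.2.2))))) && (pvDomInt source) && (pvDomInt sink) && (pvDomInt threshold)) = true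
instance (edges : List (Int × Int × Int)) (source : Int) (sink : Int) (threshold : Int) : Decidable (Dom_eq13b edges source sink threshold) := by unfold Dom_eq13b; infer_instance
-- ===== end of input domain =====

-- B replaces A's defaultdict adjacency map + explicit deque-BFS over (node, weight, visited)
-- states by a short recursive DFS that scans the edge list directly; objective: simpler.

-- Helpers shared by the two termination measures (cited in decreasing_by, so they stay above the ports).

/-- Number of elements of `nodes` not yet in `visited`: the termination measure of both searches. -/
def pvUnvis (nodes : List Int) (visited : List Int) : Nat :=
  (nodes.filter (fun x => !visited.contains x)).length

theorem pv_length_filter_lt {α : Type} (l : List α) (p : α → Bool) (v : α)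
    (hv : v ∈ l) (hp : p v = false) : (l.filter p).length < l.length := by
  obtain ⟨s, t, rfl⟩ := List.append_of_mem hv
  simp [List.filter_append, hp]
  calc (List.filter p s).length + (List.filter p t).length
      ≤ s.length + t.length := Nat.add_le_add (List.length_filter_le _ _) (List.length_filter_le _ _)
    _ < s.length + (t.length + 1) := by omega

theorem pvUnvis_add_lt (nodes visited : List Int) (v : Int)
    (hv : v ∈ nodes) (hnv : v ∉ visited) :
    pvUnvis nodes (PySem.Set.add visited v) < pvUnvis nodes visited := by
  unfold pvUnvis
  have h1 : nodes.filter (fun x => !List.contains (PySem.Set.add visited v) x)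
      = (nodes.filter (fun x => !visited.contains x)).filter (fun x => !(x == v)) := by
    rw [List.filter_filter]
    apply List.filter_congr
    intro x _
    rw [PySem.Set.add_of_not_mem hnv]
    by_cases hxv : x = v
    · subst hxv; simp
    · by_cases hxm : x ∈ visited <;> simp [hxm, hxv]
  rw [h1]
  refine pv_length_filter_lt _ _ v ?_ ?_
  · simp [List.mem_filter, hv, hnv]
  · simp

/-- targets of the raw edge list (used by B's termination measure) -/
def pvTgts (edges : List (Int × Int × Int)) : List Int :=
  PySem.Set.ofList (edges.map (fun e => e.2.1))

/-- targets stored in an adjacency dict (used by A's termination measure) -/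
def pvNodes (adj : PySem.Dict Int (List (Int × Int))) : List Int :=
  PySem.Set.ofList ((adj.values.flatten).map (fun p => p.1))

theorem pv_getD_cases {κ ν : Type} [BEq κ] (d : PySem.Dict κ (List ν)) (k : κ) :
    d.getD k [] = [] ∨ d.getD k [] ∈ d.values := by
  unfold PySem.Dict.getD
  cases h : d.get? k with
  | none => left; rfl
  | some val =>
    right
    unfold PySem.Dict.get? at h
    cases hf : List.find? (fun p => p.1 == k) d.items with
    | none => simp [hf] at h
    | some p =>
      simp [hf] at h
      have hm := List.mem_of_find?_eq_some hf
      subst h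
      exact List.mem_map.mpr ⟨p, hm, rfl⟩

theorem pv_mem_nodes (adj : PySem.Dict Int (List (Int × Int))) (u v wt : Int)
    (h : (v, wt) ∈ adj.getD u []) : v ∈ pvNodes adj := by
  rcases pv_getD_cases adj u with he | hm
  · rw [he] at h; cases h
  · unfold pvNodes
    rw [PySem.Set.mem_ofList]
    exact List.mem_map.mpr ⟨(v, wt), List.mem_flatten.mpr ⟨_, hm, h⟩, rfl⟩

theorem pv_getD_len (adj : PySem.Dict Int (List (Int × Int))) (u : Int) :
    (adj.getD u []).length ≤ adj.values.flatten.length := by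
  rcases pv_getD_cases adj u with he | hm
  · rw [he]; exact Nat.zero_le _
  · obtain ⟨s, t, hst⟩ := List.append_of_mem hm
    rw [hst]
    simp [List.length_flatten]
    omega

/-- each child's measure term is strictly below the parent's; their sum stays below it -/
theorem pv_children_sum_lt (adj : PySem.Dict Int (List (Int × Int)))
    (visited : PySem.Set Int) (u w : Int) :
    (((((adj.getD u []).filter (fun p => !visited.contains p.1)).map
        (fun p => (p.1, w + p.2, PySem.Set.add visited p.1))).map
        (fun s => (adj.values.flatten.length + 1) ^ pvUnvis (pvNodes adj) s.2.2)).sum)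
      < (adj.values.flatten.length + 1) ^ pvUnvis (pvNodes adj) visited := by
  set M := adj.values.flatten.length with hM
  set L := (adj.getD u []).filter (fun p => !visited.contains p.1) with hL
  have hmap : ((L.map (fun p => (p.1, w + p.2, PySem.Set.add visited p.1))).map
      (fun s => (M + 1) ^ pvUnvis (pvNodes adj) s.2.2))
      = L.map (fun p => (M + 1) ^ pvUnvis (pvNodes adj) (PySem.Set.add visited p.1)) := by
    rw [List.map_map]; rfl
  rw [hmap]
  by_cases hL0 : L = []
  · simp [hL0]
  · obtain ⟨p0, hmem0⟩ := List.exists_mem_of_ne_nil L hL0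
    have hprop : ∀ p ∈ L, p.1 ∈ pvNodes adj ∧ p.1 ∉ visited := by
      intro p hp
      rw [hL, List.mem_filter] at hp
      refine ⟨pv_mem_nodes adj u p.1 p.2 hp.1, ?_⟩
      have h2 := hp.2
      simp at h2
      exact h2
    have huv : 1 ≤ pvUnvis (pvNodes adj) visited := by
      obtain ⟨hn, hnv⟩ := hprop p0 hmem0
      have : p0.1 ∈ (pvNodes adj).filter (fun x => !visited.contains x) := by
        simp [List.mem_filter, hn, hnv]
      exact List.length_pos_of_mem this
    have hbound : ∀ x ∈ L.map (fun p => (M + 1) ^ pvUnvis (pvNodes adj) (PySem.Set.add visited p.1)),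
        x ≤ (M + 1) ^ (pvUnvis (pvNodes adj) visited - 1) := by
      intro x hx
      rw [List.mem_map] at hx
      obtain ⟨p, hp, rfl⟩ := hx
      obtain ⟨hn, hnv⟩ := hprop p hp
      have hlt := pvUnvis_add_lt (pvNodes adj) visited p.1 hn hnv
      exact Nat.pow_le_pow_right (by omega) (by omega)
    have hsum := List.sum_le_card_nsmul _ _ hbound
    rw [List.length_map, smul_eq_mul] at hsum
    have hlen : L.length ≤ M := by
      rw [hL, hM]
      calc ((adj.getD u []).filter _).length ≤ (adj.getD u []).length := List.length_filter_le _ _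
        _ ≤ _ := pv_getD_len adj u
    have hpos : 0 < (M + 1) ^ (pvUnvis (pvNodes adj) visited - 1) := Nat.pow_pos (by omega)
    calc (L.map _).sum ≤ L.length * (M + 1) ^ (pvUnvis (pvNodes adj) visited - 1) := hsum
      _ ≤ M * (M + 1) ^ (pvUnvis (pvNodes adj) visited - 1) := Nat.mul_le_mul_right _ hlen
      _ < (M + 1) * (M + 1) ^ (pvUnvis (pvNodes adj) visited - 1) := by nlinarith
      _ = (M + 1) ^ (pvUnvis (pvNodes adj) visited - 1 + 1) := by rw [pow_succ]; ring
      _ = (M + 1) ^ pvUnvis (pvNodes adj) visited := by congr 1; omega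

-- ===== PORT A =====

/-- `adj = defaultdict(list); for u, v, w in edges: adj[u].append((v, w))` -/
def eq13bAdj (edges : List (Int × Int × Int)) : PySem.Dict Int (List (Int × Int)) :=
  edges.foldl (fun d e => d.modify e.1 [] (fun l => l ++ [(e.2.1, e.2.2)])) PySem.Dict.empty

/-- the `while queue:` BFS loop of A over states (node, weight, visited) -/
def eq13bLoop (adj : PySem.Dict Int (List (Int × Int))) (sink threshold : Int)
    (queue : List (Int × Int × PySem.Set Int)) (count : Int) : Int :=
  match queue with
  | [] => count
  | (u, w, visited) :: rest =>
    if threshold ≤ w then eq13bLoop adj sink threshold rest count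
    else if u = sink then eq13bLoop adj sink threshold rest (count + 1)
    else eq13bLoop adj sink threshold
      (rest ++ (((adj.getD u []).filter (fun p => !visited.contains p.1)).map
        (fun p => (p.1, w + p.2, PySem.Set.add visited p.1)))) count
termination_by (queue.map
    (fun s => (adj.values.flatten.length + 1) ^ pvUnvis (pvNodes adj) s.2.2)).sum
decreasing_by
  · simp only [List.map_cons, List.sum_cons]
    have : 0 < (adj.values.flatten.length + 1) ^ pvUnvis (pvNodes adj) visited :=
      Nat.pow_pos (by omega)
    omega
  · simp only [List.map_cons, List.sum_cons]
    have : 0 < (adj.values.flatten.length + 1) ^ pvUnvis (pvNodes adj) visited :=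
      Nat.pow_pos (by omega)
    omega
  · simp only [List.map_cons, List.sum_cons, List.map_append, List.sum_append]
    have := pv_children_sum_lt adj visited u w
    omega

def eq13b (edges : List (Int × Int × Int)) (source : Int) (sink : Int) (threshold : Int) : Int :=
  eq13bLoop (eq13bAdj edges) sink threshold [(source, 0, PySem.Set.ofList [source])] 0

-- ===== PORT B =====

/-- B's recursive `dfs(u, w, visited)` -/
def eq13bDfs (edges : List (Int × Int × Int)) (sink threshold : Int)
    (u w : Int) (visited : PySem.Set Int) : Int :=
  if threshold ≤ w then 0
  else if u = sink then 1
  else ((edges.filter (fun e => e.1 == u && !visited.contains e.2.1)).attach.map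
      (fun e => eq13bDfs edges sink threshold e.1.2.1 (w + e.1.2.2)
        (PySem.Set.add visited e.1.2.1))).sum
termination_by pvUnvis (pvTgts edges) visited
decreasing_by
  rename_i e
  obtain ⟨hm, hq⟩ := List.mem_filter.mp e.2
  have hv : e.1.2.1 ∉ visited := by
    simp at hq
    exact hq.2
  have ht : e.1.2.1 ∈ pvTgts edges := by
    unfold pvTgts
    rw [PySem.Set.mem_ofList]
    exact List.mem_map.mpr ⟨e.1, hm, rfl⟩
  exact pvUnvis_add_lt _ _ _ ht hv

def eq13b_alt (edges : List (Int × Int × Int)) (source : Int) (sink : Int) (threshold : Int) : Int :=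
  eq13bDfs edges sink threshold source 0 (PySem.Set.ofList [source])

-- ===== PRECONDITION & SPEC =====
def Spec_eq13b (edges : List (Int × Int × Int)) (source : Int) (sink : Int) (threshold : Int) (out : Int) : Prop := out = eq13b_alt edges source sink threshold
instance (edges : List (Int × Int × Int)) (source : Int) (sink : Int) (threshold : Int) (out : Int) : Decidable (Spec_eq13b edges source sink threshold out) := by unfold Spec_eq13b; infer_instance

-- ===== CLAIM (what is proved, stated in full; the proofs are below) =====
def Claim_equal_eq13b : Prop := ∀ (edges : List (Int × Int × Int)) (source : Int) (sink : Int) (threshold : Int), Dom_eq13b edges source sink threshold → Spec_eq13b edges source sink threshold (eq13b edges source sink threshold)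

-- ===== LEMMAS AND PROOFS =====

/-- A's adjacency lists are the edge list filtered by source key, kept in order. -/
theorem eq13bAdj_getD (edges : List (Int × Int × Int)) (u : Int) :
    (eq13bAdj edges).getD u []
      = (edges.filter (fun e => e.1 == u)).map (fun e => (e.2.1, e.2.2)) := by
  unfold eq13bAdj
  have h := PySem.Dict.getD_foldl_modify_append
    (l := edges.map (fun e => (e.1, (e.2.1, e.2.2)))) (d := PySem.Dict.empty) (c := u)
  rw [List.foldl_map] at h
  simpa [PySem.Dict.getD_empty, List.filter_map, Function.comp] using h

/-- the filtered adjacency entries BFS enqueues are exactly the edges B's dfs recurses on -/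
theorem eq13b_children_eq (edges : List (Int × Int × Int)) (u : Int) (visited : PySem.Set Int) :
    ((eq13bAdj edges).getD u []).filter (fun p => !visited.contains p.1)
      = (edges.filter (fun e => e.1 == u && !visited.contains e.2.1)).map
          (fun e => (e.2.1, e.2.2)) := by
  rw [eq13bAdj_getD, List.filter_map]
  congr 1
  rw [List.filter_filter]
  apply List.filter_congr
  intro e _
  simp [Function.comp, Bool.and_comm]

theorem pv_sum_attach {α : Type} (l : List α) (f : α → Int) :
    (l.attach.map (fun e => f e.1)).sum = (l.map f).sum := by
  rw [List.attach_map_val]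

/-- BFS invariant: the loop returns `count` plus the dfs-count of every queued state. -/
theorem eq13bLoop_eq (edges : List (Int × Int × Int)) (sink threshold : Int)
    (queue : List (Int × Int × PySem.Set Int)) (count : Int) :
    eq13bLoop (eq13bAdj edges) sink threshold queue count
      = count + (queue.map
          (fun s => eq13bDfs edges sink threshold s.1 s.2.1 s.2.2)).sum := by
  fun_induction eq13bLoop (eq13bAdj edges) sink threshold queue count with
  | case1 count => simp
  | case2 count u w visited rest hw ih =>
    rw [ih, List.map_cons, List.sum_cons, eq13bDfs.eq_def]
    simp [hw]
  | case3 count w visited rest hw ih =>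
    rw [ih, List.map_cons, List.sum_cons, eq13bDfs.eq_def]
    simp [hw]
    ring
  | case4 count u w visited rest h1 h2 ih =>
    rw [ih, List.map_append, List.sum_append, List.map_cons, List.sum_cons]
    have hd : eq13bDfs edges sink threshold u w visited
        = (List.map (fun s => eq13bDfs edges sink threshold s.1 s.2.1 s.2.2)
            (List.map (fun p => (p.1, w + p.2, visited.add p.1))
              (List.filter (fun p => !visited.contains p.1) ((eq13bAdj edges).getD u [])))).sum := by
      rw [eq13bDfs.eq_def]
      simp only [if_neg h1, if_neg h2]
      rw [List.map_map, eq13b_children_eq, List.map_map]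
      exact (pv_sum_attach (List.filter (fun e => e.1 == u && !visited.contains e.2.1) edges)
        (fun e => eq13bDfs edges sink threshold e.2.1 (w + e.2.2)
          (PySem.Set.add visited e.2.1))).trans rfl
    rw [hd]
    ring

-- ===== VERDICT (by name: the statement is the Claim_ definition above) =====
theorem eq13b_spec : Claim_equal_eq13b := by
  intro edges source sink threshold _
  unfold Spec_eq13b eq13b eq13b_alt
  rw [eq13bLoop_eq]
  simp
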